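-- pv_equiv track=rewrite | github.com/ettore-galli/spikes | matrix/matrice.py | crea_matrice
-- ===== SOURCE A (Python) =====
-- def crea_matrice(size: int, stars: int):
--     return [
--         [
--             1 if i < stars or size - i < (stars + 1) or j < stars or size - j < (stars + 1) else 0
--             for i in range(size)
--         ]
--         for j in range(size)
--     ]
-- ===== SOURCE B (Python) =====
-- def crea_matrice(size, stars):
--     # Two row templates (border row, middle row) built once, then replicated per row.
--     s = max(stars, 0)
--     if 2 * s >= size:
--         return [[1] * size for _ in range(size)]
--     border = [1] * size
--     middle = [1] * s + [0] * (size - 2 * s) + [1] * s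
--     return [list(border) if r < s or r >= size - s else list(middle) for r in range(size)]
-- ===== Notes on version B (the rewrite author's own statement) =====
-- stated objective: simpler
-- what changed: Instead of evaluating a four-way border predicate for every cell, B precomputes two row templates (an all-ones border row and a middle row 1^s 0^(size-2s) 1^s, with stars clamped to [0, size/2]) and replicates the appropriate template per row.
import Mathlib
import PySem

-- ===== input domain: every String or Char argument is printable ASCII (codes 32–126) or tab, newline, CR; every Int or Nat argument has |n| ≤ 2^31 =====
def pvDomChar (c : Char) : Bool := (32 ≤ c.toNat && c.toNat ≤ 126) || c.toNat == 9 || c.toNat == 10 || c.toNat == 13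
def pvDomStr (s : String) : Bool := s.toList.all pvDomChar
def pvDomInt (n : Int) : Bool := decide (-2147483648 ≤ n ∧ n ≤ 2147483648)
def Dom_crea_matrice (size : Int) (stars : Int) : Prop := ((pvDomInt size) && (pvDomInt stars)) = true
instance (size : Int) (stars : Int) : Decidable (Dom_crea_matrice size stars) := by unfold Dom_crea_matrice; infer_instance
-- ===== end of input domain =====

-- B replaces A's per-cell border predicate by two precomputed row templates replicated per row (objective: simpler).

-- ===== PORT A =====
-- nested comprehension: for each row j, for each column i, test the border predicate per cell
def crea_matrice (size : Int) (stars : Int) : List (List Int) :=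
  (PySem.List.pyRange 0 size 1).map (fun j =>
    (PySem.List.pyRange 0 size 1).map (fun i =>
      if i < stars ∨ size - i < stars + 1 ∨ j < stars ∨ size - j < stars + 1 then (1:Int) else 0))

-- ===== PORT B =====
-- clamp stars, build the two row templates once, replicate them per row
def crea_matrice_alt (size : Int) (stars : Int) : List (List Int) :=
  if 2 * max stars 0 ≥ size then
    (PySem.List.pyRange 0 size 1).map (fun _ => List.replicate size.toNat (1:Int))
  else
    (PySem.List.pyRange 0 size 1).map (fun r =>
      if r < max stars 0 ∨ size - max stars 0 ≤ r then
        List.replicate size.toNat (1:Int)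
      else
        List.replicate (max stars 0).toNat (1:Int)
          ++ List.replicate (size - 2 * max stars 0).toNat (0:Int)
          ++ List.replicate (max stars 0).toNat (1:Int))

-- ===== PRECONDITION & SPEC =====
def Spec_crea_matrice (size : Int) (stars : Int) (out : List (List Int)) : Prop := out = crea_matrice_alt size stars
instance (size : Int) (stars : Int) (out : List (List Int)) : Decidable (Spec_crea_matrice size stars out) := by unfold Spec_crea_matrice; infer_instance

-- ===== CLAIM (what is proved, stated in full; the proofs are below) =====
def Claim_equal_crea_matrice : Prop := ∀ (size : Int) (stars : Int), Dom_crea_matrice size stars → Spec_crea_matrice size stars (crea_matrice size stars)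

-- ===== LEMMAS AND PROOFS =====

-- a map over an integer range whose function is constant on the range is a replicate
theorem pyRange_map_const {α : Type} (a b : Int) (n : Nat) (f : Int → α) (c : α)
    (hn : (b - a).toNat = n)
    (h : ∀ x, a ≤ x → x < b → f x = c) :
    (PySem.List.pyRange a b 1).map f = List.replicate n c := by
  have h1 : (PySem.List.pyRange a b 1).map f
      = (PySem.List.pyRange a b 1).map (fun _ => c) := by
    apply List.map_congr_left
    intro x hx
    rw [PySem.List.mem_pyRange_one] at hx
    exact h x hx.1 hx.2
  rw [h1, List.map_const', PySem.List.length_pyRange_one, hn]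

-- ===== VERDICT (by name: the statement is the Claim_ definition above) =====
theorem crea_matrice_spec : Claim_equal_crea_matrice := by
  intro size stars _
  unfold Spec_crea_matrice crea_matrice crea_matrice_alt
  by_cases h1 : 2 * max stars 0 ≥ size
  · rw [if_pos h1]
    apply List.map_congr_left
    intro j hj
    rw [PySem.List.mem_pyRange_one] at hj
    apply pyRange_map_const
    · omega
    · intro x hx1 hx2
      split_ifs with hP <;> omega
  · rw [if_neg h1]
    apply List.map_congr_left
    intro j hj
    rw [PySem.List.mem_pyRange_one] at hj
    by_cases hb : j < max stars 0 ∨ size - max stars 0 ≤ j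
    · rw [if_pos hb]
      apply pyRange_map_const
      · omega
      · intro x hx1 hx2
        split_ifs with hP <;> omega
    · rw [if_neg hb]
      rw [PySem.List.pyRange_one_append 0 (size - max stars 0) size (by omega) (by omega),
          PySem.List.pyRange_one_append 0 (max stars 0) (size - max stars 0) (by omega) (by omega),
          List.map_append, List.map_append]
      congr 1
      · congr 1
        · apply pyRange_map_const
          · omega
          · intro x hx1 hx2
            split_ifs with hP <;> omega
        · apply pyRange_map_const
          · omega
          · intro x hx1 hx2
            split_ifs with hP <;> omega
      · apply pyRange_map_const
        · omega
        · intro x hx1 hx2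
          split_ifs with hP <;> omega
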